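-- pv_equiv track=rewrite | github.com/humancipher/Programming_Contest | Programming_Contest/AtCoder/ABC/ABC_001-099/ABC_090-099/ABC_098/ABC_098_C.py | solve
-- ===== SOURCE A (Python) =====
-- def solve(S,N):
--     E,W = [0 for _ in range(N)],[0 for _ in range(N)]
--     for i in range(N):
--         if S[i] == "E":
--             E[i] = 1
--         else:
--             W[i] = 1
--
--     for i in range(1,N):
--         E[i] += E[i-1]
--         W[i] += W[i-1]
--
--     ans = N
--     for i in range(1,N):
--         ans = min(ans,W[i-1]+(E[N-1]-E[i]))
--     ans = min(ans,E[N-1]-E[0])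
--
--     return ans
-- ===== SOURCE B (Python) =====
-- def solve(S, N):
--     # One sweep with two running counters instead of building prefix-sum arrays.
--     totalE = S[:N].count("E")
--     leftW = 0
--     rightE = totalE - (1 if S[0] == "E" else 0)
--     ans = leftW + rightE
--     for p in range(1, N):
--         if S[p - 1] != "E":
--             leftW += 1
--         if S[p] == "E":
--             rightE -= 1
--         ans = min(ans, leftW + rightE)
--     return ans
-- ===== Notes on version B (the rewrite author's own statement) =====
-- stated objective: alternative
-- what changed: A builds E/W indicator arrays, turns them into prefix-sum arrays in a second pass, then scans leaders reading the arrays; B keeps no arrays at all and does one sweep maintaining two running counters (W's left of the leader, E's right of it), updating the minimum on the fly.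
import Mathlib
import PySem

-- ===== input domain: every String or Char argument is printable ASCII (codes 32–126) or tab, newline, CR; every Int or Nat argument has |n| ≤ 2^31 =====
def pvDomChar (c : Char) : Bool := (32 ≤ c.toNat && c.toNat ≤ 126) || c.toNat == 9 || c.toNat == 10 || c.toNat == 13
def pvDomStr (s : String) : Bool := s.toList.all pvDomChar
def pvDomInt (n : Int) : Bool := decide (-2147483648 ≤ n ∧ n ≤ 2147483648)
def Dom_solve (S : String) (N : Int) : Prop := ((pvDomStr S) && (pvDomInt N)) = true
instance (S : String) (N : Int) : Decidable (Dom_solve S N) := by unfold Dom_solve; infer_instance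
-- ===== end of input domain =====

-- B replaces A's three passes building E/W prefix-sum arrays by one sweep keeping two running
-- counters (W's left of the leader, E's right of it); same return value, no arrays.

-- ===== PORT A =====
def solve (S : String) (N : Int) : Int :=
  let cs := S.toList
  let E0 : List Int := (PySem.List.pyRange 0 N 1).map (fun _ => 0)
  let W0 : List Int := (PySem.List.pyRange 0 N 1).map (fun _ => 0)
  let EW1 := (PySem.List.pyRange 0 N 1).foldl (fun (ew : List Int × List Int) i =>
      if PySem.List.pyGetD cs i ' ' = 'E' then (PySem.List.pySetD ew.1 i 1, ew.2)
      else (ew.1, PySem.List.pySetD ew.2 i 1)) (E0, W0)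
  let EW := (PySem.List.pyRange 1 N 1).foldl (fun (ew : List Int × List Int) i =>
      (PySem.List.pySetD ew.1 i (PySem.List.pyGetD ew.1 i 0 + PySem.List.pyGetD ew.1 (i-1) 0),
       PySem.List.pySetD ew.2 i (PySem.List.pyGetD ew.2 i 0 + PySem.List.pyGetD ew.2 (i-1) 0))) EW1
  let ans := (PySem.List.pyRange 1 N 1).foldl (fun ans i =>
      min ans (PySem.List.pyGetD EW.2 (i-1) 0 + (PySem.List.pyGetD EW.1 (N-1) 0 - PySem.List.pyGetD EW.1 i 0))) N
  min ans (PySem.List.pyGetD EW.1 (N-1) 0 - PySem.List.pyGetD EW.1 0 0)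

-- ===== PORT B =====
def solve_alt (S : String) (N : Int) : Int :=
  let cs := S.toList
  let totalE : Int := (PySem.List.slice cs none (some N)).foldl
      (fun acc c => if c = 'E' then acc + 1 else acc) 0
  let rightE0 : Int := totalE - (if PySem.List.pyGetD cs 0 ' ' = 'E' then 1 else 0)
  let st := (PySem.List.pyRange 1 N 1).foldl (fun (st : Int × Int × Int) p =>
      let lW := if PySem.List.pyGetD cs (p-1) ' ' ≠ 'E' then st.1 + 1 else st.1
      let rE := if PySem.List.pyGetD cs p ' ' = 'E' then st.2.1 - 1 else st.2.1
      (lW, rE, min st.2.2 (lW + rE))) ((0 : Int), rightE0, (0 : Int) + rightE0)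
  st.2.2

-- ===== PRECONDITION & SPEC =====
-- Pre: Python A raises IndexError unless 1 ≤ N ≤ len(S) (N ≤ 0 hits E[-1] on an empty list,
-- N > len(S) hits S[i] out of range).
def Pre_solve (S : String) (N : Int) : Prop := 1 ≤ N ∧ N ≤ (S.toList.length : Int)
instance (S : String) (N : Int) : Decidable (Pre_solve S N) := by unfold Pre_solve; infer_instance
def pvWitness_solve : String × Int := ("EWEW", 4)

def Spec_solve (S : String) (N : Int) (out : Int) : Prop := out = solve_alt S N
instance (S : String) (N : Int) (out : Int) : Decidable (Spec_solve S N out) := by unfold Spec_solve; infer_instance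

-- ===== CLAIM (what is proved, stated in full; the proofs are below) =====
def Claim_equal_solve : Prop := ∀ (S : String) (N : Int), Dom_solve S N → Pre_solve S N → Spec_solve S N (solve S N)

-- ===== LEMMAS AND PROOFS =====

-- indicator of 'E' / of not-'E', and their running sums
def indE (c : Char) : Int := if c = 'E' then 1 else 0
def indW (c : Char) : Int := if c = 'E' then 0 else 1
def eC (l : List Char) : Int := (l.map indE).sum
def wC (l : List Char) : Int := (l.map indW).sum






theorem eC_le_length (l : List Char) : eC l ≤ (l.length : Int) := by
  induction l with
  | nil => simp [eC]
  | cons c t ih => simp only [eC, indE, List.map_cons, List.sum_cons, List.length_cons] at *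
                   split <;> push_cast <;> omega

theorem set_append_len (l1 l2 : List Int) (v : Int) :
    (l1 ++ l2).set l1.length v = l1 ++ l2.set 0 v := by
  induction l1 with
  | nil => rfl
  | cons a t ih => simp [ih]

theorem getD_append_len (l1 l2 : List Int) (d : Int) :
    (l1 ++ l2).getD l1.length d = l2.getD 0 d := by
  induction l1 with
  | nil => rfl
  | cons a t ih => simpa using ih

theorem getD_append_lt (l1 l2 : List Int) (k : Nat) (h : k < l1.length) (d : Int) :
    (l1 ++ l2).getD k d = l1.getD k d := by
  induction l1 generalizing k with
  | nil => simp at h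
  | cons a t ih =>
      cases k with
      | zero => rfl
      | succ k => simp only [List.cons_append, List.getD_cons_succ]
                  exact ih k (by simpa using h)

theorem take_succ_getElem {α : Type} (l : List α) (k : Nat) (h : k < l.length) :
    l.take (k + 1) = l.take k ++ [l[k]] := by
  rw [List.take_add_one]
  simp [List.getElem?_eq_getElem h]


theorem loop1 (cs : List Char) (n : Nat) (hn : n ≤ cs.length) (k : Nat) (hk : k ≤ n) :
    (PySem.List.pyRange 0 (k : Int) 1).foldl (fun (ew : List Int × List Int) i =>
        if PySem.List.pyGetD cs i ' ' = 'E' then (PySem.List.pySetD ew.1 i 1, ew.2)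
        else (ew.1, PySem.List.pySetD ew.2 i 1))
      (List.replicate n 0, List.replicate n 0)
    = ((cs.take k).map indE ++ List.replicate (n - k) 0,
       (cs.take k).map indW ++ List.replicate (n - k) 0) := by
  induction k with
  | zero => simp
  | succ k ih =>
      have hk' : k < n := hk
      have hkc : k < cs.length := lt_of_lt_of_le hk' hn
      have hrange : PySem.List.pyRange 0 ((k:Int)+1) 1
          = PySem.List.pyRange 0 (k:Int) 1 ++ [(k:Int)] :=
        PySem.List.pyRange_one_succ_right (by exact_mod_cast Nat.zero_le k)
      have hlE : ((cs.take k).map indE).length = k := by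
        simp [List.length_take]; omega
      have hlW : ((cs.take k).map indW).length = k := by
        simp [List.length_take]; omega
      have hrep : n - k = (n - (k + 1)) + 1 := by omega
      push_cast
      rw [hrange, List.foldl_append, ih (le_of_lt hk'), List.foldl_cons, List.foldl_nil]
      rw [take_succ_getElem cs k hkc]
      have hget : PySem.List.pyGetD cs ((k : Nat) : Int) ' ' = cs[k] := by
        rw [PySem.List.pyGetD_natCast, List.getD_eq_getElem]
      rw [hget]
      by_cases hE : cs[k] = 'E'
      · rw [if_pos hE]
        simp only [Prod.mk.injEq]
        constructor
        · rw [PySem.List.pySetD_natCast, hrep, List.replicate_succ]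
          have hs := set_append_len ((cs.take k).map indE) (0 :: List.replicate (n - (k+1)) 0) 1
          rw [hlE] at hs
          rw [hs]
          simp [indE, hE]
        · rw [hrep, List.replicate_succ, List.map_append]
          have h0 : List.map indW [cs[k]] = [(0:Int)] := by simp [indW, hE]
          rw [h0]
          simp
      · rw [if_neg hE]
        simp only [Prod.mk.injEq]
        constructor
        · rw [hrep, List.replicate_succ, List.map_append]
          have h0 : List.map indE [cs[k]] = [(0:Int)] := by simp [indE, hE]
          rw [h0]
          simp
        · rw [PySem.List.pySetD_natCast, hrep, List.replicate_succ]
          have hs := set_append_len ((cs.take k).map indW) (0 :: List.replicate (n - (k+1)) 0) 1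
          rw [hlW] at hs
          rw [hs]
          simp only [List.set_cons_zero]
          rw [List.map_append]
          have h1 : List.map indW [cs[k]] = [(1:Int)] := by simp [indW, hE]
          rw [h1]
          simp

theorem prefix_step (f : Char → Int) (t : List Char) (k : Nat) (hk1 : 1 ≤ k) (hkt : k < t.length) :
    PySem.List.pySetD ((List.range k).map (fun j => ((t.take (j+1)).map f).sum) ++ (t.drop k).map f) (k:Int)
      (PySem.List.pyGetD ((List.range k).map (fun j => ((t.take (j+1)).map f).sum) ++ (t.drop k).map f) (k:Int) 0
       + PySem.List.pyGetD ((List.range k).map (fun j => ((t.take (j+1)).map f).sum) ++ (t.drop k).map f) ((k:Int)-1) 0)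
    = (List.range (k+1)).map (fun j => ((t.take (j+1)).map f).sum) ++ (t.drop (k+1)).map f := by
  set P := (List.range k).map (fun j => ((t.take (j+1)).map f).sum) with hP
  have hlP : P.length = k := by simp [hP]
  have hdrop : t.drop k = t[k] :: t.drop (k+1) := List.drop_eq_getElem_cons hkt
  have hget1 : PySem.List.pyGetD (P ++ (t.drop k).map f) (k:Int) 0 = f t[k] := by
    rw [PySem.List.pyGetD_natCast]
    have h := getD_append_len P ((t.drop k).map f) 0
    rw [hlP] at h
    rw [h, hdrop]
    rfl
  have hget2 : PySem.List.pyGetD (P ++ (t.drop k).map f) ((k:Int)-1) 0 = ((t.take k).map f).sum := by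
    have hcast : (k:Int) - 1 = ((k-1 : Nat) : Int) := by omega
    rw [hcast, PySem.List.pyGetD_natCast]
    rw [getD_append_lt _ _ _ (by omega) 0]
    rw [List.getD_eq_getElem _ _ (by omega : k - 1 < P.length)]
    simp only [hP, List.getElem_map, List.getElem_range]
    have hkk : k - 1 + 1 = k := by omega
    rw [hkk]
  rw [hget1, hget2, PySem.List.pySetD_natCast]
  have hs := set_append_len P ((t.drop k).map f) (f t[k] + ((t.take k).map f).sum)
  rw [hlP] at hs
  rw [hs, hdrop, List.map_cons, List.set_cons_zero]
  rw [List.range_succ, List.map_append]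
  have hsum : ((t.take (k+1)).map f).sum = ((t.take k).map f).sum + f t[k] := by
    rw [take_succ_getElem t k hkt, List.map_append, List.sum_append]
    simp
  simp only [List.map_cons, List.map_nil, ← hP]
  rw [hsum, List.append_assoc, List.singleton_append, Int.add_comm]

theorem loop2 (t : List Char) (n : Nat) (ht : t.length = n) (k : Nat) (hk1 : 1 ≤ k) (hk : k ≤ n) :
    (PySem.List.pyRange 1 (k : Int) 1).foldl (fun (ew : List Int × List Int) i =>
        (PySem.List.pySetD ew.1 i (PySem.List.pyGetD ew.1 i 0 + PySem.List.pyGetD ew.1 (i-1) 0),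
         PySem.List.pySetD ew.2 i (PySem.List.pyGetD ew.2 i 0 + PySem.List.pyGetD ew.2 (i-1) 0)))
      (t.map indE, t.map indW)
    = ((List.range k).map (fun j => ((t.take (j+1)).map indE).sum) ++ (t.drop k).map indE,
       (List.range k).map (fun j => ((t.take (j+1)).map indW).sum) ++ (t.drop k).map indW) := by
  induction k, hk1 using Nat.le_induction with
  | base =>
      have h0 : 0 < t.length := by omega
      have ht1 : t.take 1 = [t[0]] := by
        rw [take_succ_getElem t 0 h0]; rfl
      have htm : ∀ f : Char → Int, t.map f = [f t[0]] ++ (t.drop 1).map f := by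
        intro f
        conv_lhs => rw [← List.take_append_drop 1 t]
        rw [List.map_append, ht1, List.map_cons, List.map_nil]
      simp
      constructor
      · rw [htm indE]; simp
      · rw [htm indW]; simp
  | succ k hk1 ih =>
      have hkn : k < n := hk
      have hkt : k < t.length := by omega
      have hrange : PySem.List.pyRange 1 ((k:Int)+1) 1
          = PySem.List.pyRange 1 (k:Int) 1 ++ [(k:Int)] :=
        PySem.List.pyRange_one_succ_right (by exact_mod_cast hk1)
      push_cast
      rw [hrange, List.foldl_append, ih (by omega), List.foldl_cons, List.foldl_nil]
      simp only [Prod.mk.injEq]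
      exact ⟨prefix_step indE t k hk1 hkt, prefix_step indW t k hk1 hkt⟩

theorem getD_map_range' (f : Nat → Int) (n k : Nat) (h : k < n) (d : Int) :
    ((List.range n).map f).getD k d = f k := by
  rw [List.getD_eq_getElem _ _ (by simpa using h)]
  simp

theorem foldl_min_min (l : List Int) (g : Int → Int) (a c : Int) :
    l.foldl (fun x i => min x (g i)) (min a c) = min (l.foldl (fun x i => min x (g i)) a) c := by
  induction l generalizing a with
  | nil => simp
  | cons x xs ih =>
      simp only [List.foldl_cons]
      rw [min_right_comm, ih]

-- the cost of making position j the leader: W's strictly left + E's strictly right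
def cost (t : List Char) (j : Nat) : Int :=
    ((t.take j).map indW).sum + ((t.drop (j+1)).map indE).sum

theorem loopB (cs : List Char) (n : Nat) (hn : n ≤ cs.length)
    (k : Nat) (hk1 : 1 ≤ k) (hk : k ≤ n) :
    (PySem.List.pyRange 1 (k : Int) 1).foldl (fun (st : Int × Int × Int) p =>
        let lW := if PySem.List.pyGetD cs (p-1) ' ' ≠ 'E' then st.1 + 1 else st.1
        let rE := if PySem.List.pyGetD cs p ' ' = 'E' then st.2.1 - 1 else st.2.1
        (lW, rE, min st.2.2 (lW + rE)))
      ((0 : Int), (((cs.take n).drop 1).map indE).sum, (0 : Int) + (((cs.take n).drop 1).map indE).sum)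
    = ((((cs.take n).take (k-1)).map indW).sum, (((cs.take n).drop k).map indE).sum,
       (PySem.List.pyRange 1 (k : Int) 1).foldl (fun ans i => min ans (cost (cs.take n) i.toNat))
         ((0 : Int) + (((cs.take n).drop 1).map indE).sum)) := by
  set t := cs.take n with hT
  have hlt : t.length = n := by simp [hT]; omega
  induction k, hk1 using Nat.le_induction with
  | base => simp
  | succ k hk1 ih =>
      have hkn : k < n := hk
      have hkc : k < cs.length := by omega
      have hkt : k < t.length := by omega
      have hk1c : k - 1 < cs.length := by omega
      have hk1t : k - 1 < t.length := by omega
      have hrange : PySem.List.pyRange 1 ((k:Int)+1) 1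
          = PySem.List.pyRange 1 (k:Int) 1 ++ [(k:Int)] :=
        PySem.List.pyRange_one_succ_right (by exact_mod_cast hk1)
      push_cast
      rw [hrange, List.foldl_append, List.foldl_append, ih (by omega), List.foldl_cons,
        List.foldl_nil, List.foldl_cons, List.foldl_nil]
      have hcast : (k:Int) - 1 = ((k-1 : Nat) : Int) := by omega
      have hgetk : PySem.List.pyGetD cs ((k:Nat):Int) ' ' = t[k] := by
        rw [PySem.List.pyGetD_natCast, List.getD_eq_getElem _ _ hkc]
        simp [hT]
      have hgetk1 : PySem.List.pyGetD cs (((k:Nat):Int) - 1) ' ' = t[k-1] := by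
        rw [hcast, PySem.List.pyGetD_natCast, List.getD_eq_getElem _ _ hk1c]
        simp [hT]
      simp only [hgetk, hgetk1]
      have hlW : (if ¬ t[k-1] = 'E' then ((t.take (k-1)).map indW).sum + 1
            else ((t.take (k-1)).map indW).sum) = ((t.take k).map indW).sum := by
        have hts : t.take k = t.take (k-1) ++ [t[k-1]] := by
          have := take_succ_getElem t (k-1) hk1t
          rwa [Nat.sub_add_cancel hk1] at this
        rw [hts, List.map_append, List.sum_append]
        by_cases hE : t[k-1] = 'E' <;> simp [hE, indW]
      have hrE : (if t[k] = 'E' then ((t.drop k).map indE).sum - 1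
            else ((t.drop k).map indE).sum) = ((t.drop (k+1)).map indE).sum := by
        rw [List.drop_eq_getElem_cons hkt, List.map_cons, List.sum_cons]
        by_cases hE : t[k] = 'E' <;> simp [hE, indE]
      simp only [Prod.mk.injEq]
      refine ⟨by simpa using hlW, by simpa using hrE, ?_⟩
      congr 1
      rw [hlW, hrE]
      simp [cost]

theorem count_fold (l : List Char) (a : Int) :
    l.foldl (fun acc c => if c = 'E' then acc + 1 else acc) a = a + (l.map indE).sum := by
  induction l generalizing a with
  | nil => simp
  | cons c l2 ih =>
      simp only [List.foldl_cons, List.map_cons, List.sum_cons]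
      rw [ih]
      by_cases h : c = 'E'
      all_goals (simp [h, indE]; try ring)

theorem sum_split (f : Char → Int) (t : List Char) (m : Nat) :
    (t.map f).sum = ((t.take m).map f).sum + ((t.drop m).map f).sum := by
  conv_lhs => rw [← List.take_append_drop m t]
  rw [List.map_append, List.sum_append]



-- ===== VERDICT (by name: the statement is the Claim_ definition above) =====
theorem solve_spec : Claim_equal_solve := by
  unfold Claim_equal_solve Spec_solve Pre_solve
  intro S N _ hpre
  obtain ⟨h1, h2⟩ := hpre
  have hN : N = (N.toNat : Int) := by omega
  rw [hN]
  unfold solve solve_alt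
  dsimp only []
  set n := N.toNat with hn
  set cs := S.toList with hcs
  set t := cs.take n with hT
  have hn1 : 1 ≤ n := by omega
  have hnl : n ≤ cs.length := by omega
  have hlt : t.length = n := by simp [hT]; omega
  have h0t : 0 < t.length := by omega
  -- A: the three passes
  have e0 : (PySem.List.pyRange 0 (n:Int) 1).map (fun _ => (0:Int)) = List.replicate n (0:Int) := by
    rw [PySem.List.pyRange_one]
    simp [Function.comp_def]
  have hl1 := loop1 cs n hnl n le_rfl
  rw [Nat.sub_self, List.replicate_zero, List.append_nil, List.append_nil] at hl1
  have hl2 := loop2 t n hlt n hn1 le_rfl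
  simp only [show t.drop n = [] from by rw [← hlt, List.drop_length], List.map_nil,
    List.append_nil] at hl2
  rw [e0, hl1, ← hT, hl2]
  dsimp only []
  -- getD facts about the two prefix-sum arrays
  have hEn : PySem.List.pyGetD ((List.range n).map (fun j => ((t.take (j+1)).map indE).sum)) ((n:Int) - 1) 0
      = (t.map indE).sum := by
    rw [show (n:Int) - 1 = ((n-1 : Nat) : Int) from by omega, PySem.List.pyGetD_natCast,
      getD_map_range' _ _ _ (by omega)]
    rw [show n - 1 + 1 = n from by omega, ← hlt, List.take_length]
  have hE0 : PySem.List.pyGetD ((List.range n).map (fun j => ((t.take (j+1)).map indE).sum)) 0 0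
      = ((t.take 1).map indE).sum := by
    rw [PySem.List.pyGetD_zero, getD_map_range' _ _ _ (by omega)]
  -- loop 3 of A computes the min of the leader costs
  have hfold : ∀ acc (i : Int), i ∈ PySem.List.pyRange 1 (n:Int) 1 →
      min acc (PySem.List.pyGetD ((List.range n).map (fun j => ((t.take (j+1)).map indW).sum)) (i-1) 0
        + (PySem.List.pyGetD ((List.range n).map (fun j => ((t.take (j+1)).map indE).sum)) ((n:Int)-1) 0
           - PySem.List.pyGetD ((List.range n).map (fun j => ((t.take (j+1)).map indE).sum)) i 0))
      = min acc (cost t i.toNat) := by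
    intro acc i hi
    rw [PySem.List.mem_pyRange_one] at hi
    obtain ⟨j, rfl⟩ : ∃ j : Nat, i = (j : Int) := ⟨i.toNat, by omega⟩
    have hj1 : 1 ≤ j := by omega
    have hjn : j < n := by exact_mod_cast hi.2
    rw [hEn, show (j:Int) - 1 = ((j-1 : Nat) : Int) from by omega,
      PySem.List.pyGetD_natCast, PySem.List.pyGetD_natCast,
      getD_map_range' _ _ _ (by omega), getD_map_range' _ _ _ (by omega),
      show j - 1 + 1 = j from by omega]
    have hsplit := sum_split indE t (j+1)
    simp only [Int.toNat_natCast, cost]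
    omega
  have heq := PySem.List.foldl_congr_mem (init := ((n:Nat):Int)) (h := hfold)
  rw [heq, hEn, hE0]
  -- B: the slice count and the one-sweep loop
  rw [show PySem.List.slice cs none (some (n:Int)) = t from by rw [hT, PySem.List.slice_to_natCast],
    count_fold, zero_add]
  have hite : (if PySem.List.pyGetD cs 0 ' ' = 'E' then (1:Int) else 0) = ((t.take 1).map indE).sum := by
    rw [PySem.List.pyGetD_zero, List.getD_eq_getElem _ _ (by omega : 0 < cs.length),
      take_succ_getElem t 0 h0t]
    simp [hT, indE]
  rw [hite, show (t.map indE).sum - ((t.take 1).map indE).sum = ((t.drop 1).map indE).sum from by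
      have := sum_split indE t 1; omega]
  have hB := loopB cs n hnl n hn1 le_rfl
  rw [← hT] at hB
  rw [hB]
  dsimp only []
  -- both sides are now min-folds of the same costs; align the seeds
  rw [zero_add, ← foldl_min_min]
  have hc : min ((n:Int)) (((t.drop 1).map indE).sum) = ((t.drop 1).map indE).sum := by
    have h1' := eC_le_length (t.drop 1)
    have h2' : ((t.drop 1).length : Int) ≤ (n:Int) := by simp [hlt]
    exact min_eq_right (le_trans h1' h2')
  rw [hc]
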